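-- pv_equiv track=rewrite | github.com/akhor16/test-project | test_algorithm.py | unset
-- ===== SOURCE A (Python) =====
-- def unset(xs):
--     """Algorithm to find symbols from runs with maximum length"""
--     if not xs:
--         return []
--
--     # Build runs
--     runs = []
--     cur = xs[0]
--     cnt = 1
--     for x in xs[1:]:
--         if x == cur:
--             cnt += 1
--         else:
--             runs.append((cur, cnt))
--             cur = x
--             cnt = 1
--     runs.append((cur, cnt))
--
--     max_len = max(length for _, length in runs)
--     if max_len == 1:
--         return []
--
--     # Collect unique symbols from runs with length == max_len, then sort
--     chars = []
--     for sym, length in runs: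
--         if length == max_len and sym not in chars:
--             chars.append(sym)
--     return sorted(chars)
-- ===== SOURCE B (Python) =====
-- def unset(xs):
--     """Symbols of maximum-length runs, sorted.
--     DP over positions: lens[i] = length of the run ending at index i;
--     then collect (via a set) the symbols at positions where lens hits the max."""
--     if not xs:
--         return []
--     lens = [1]
--     for prev, x in zip(xs, xs[1:]):
--         lens.append(lens[-1] + 1 if x == prev else 1)
--     m = max(lens)
--     if m == 1:
--         return []
--     return sorted({x for x, l in zip(xs, lens) if l == m})
-- ===== Notes on version B (the rewrite author's own statement) =====
-- stated objective: alternative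
-- what changed: Instead of building an explicit run list and deduplicating with a membership scan, B computes a per-position DP array lens[i] = length of the run ending at index i (via zip(xs, xs[1:])), takes its maximum, and returns sorted({x for x,l in zip(xs,lens) if l == m}).
import Mathlib
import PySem

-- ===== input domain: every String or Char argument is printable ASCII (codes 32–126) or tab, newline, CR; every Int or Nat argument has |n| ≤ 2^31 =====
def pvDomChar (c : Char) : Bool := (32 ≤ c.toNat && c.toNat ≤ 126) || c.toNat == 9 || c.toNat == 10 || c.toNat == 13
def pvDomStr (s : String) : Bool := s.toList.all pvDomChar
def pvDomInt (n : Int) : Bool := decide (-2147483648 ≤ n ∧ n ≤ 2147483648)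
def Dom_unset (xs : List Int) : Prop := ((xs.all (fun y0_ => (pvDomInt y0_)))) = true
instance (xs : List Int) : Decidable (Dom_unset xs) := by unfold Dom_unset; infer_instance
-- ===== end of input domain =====

-- B replaces A's explicit run list and membership-scan dedup by a per-position DP array
-- (run length ending at each index), a max over it, and a set comprehension (objective: alternative).

-- ===== PORT A =====
-- state: (runs built so far, current symbol, current count)
def pvStepA (st : List (Int × Int) × Int × Int) (x : Int) : List (Int × Int) × Int × Int :=
  if x == st.2.1 then (st.1, st.2.1, st.2.2 + 1)
  else (st.1 ++ [(st.2.1, st.2.2)], x, (1 : Int))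

def unset (xs : List Int) : List Int :=
  match xs with
  | [] => []
  | x0 :: rest =>
    let s := rest.foldl pvStepA ([], x0, (1 : Int))
    let runs := s.1 ++ [(s.2.1, s.2.2)]
    match PySem.List.max? (runs.map (fun p => p.2)) (fun y => y) with
    | none => []                      -- unreachable: runs is nonempty
    | some maxLen =>
      if maxLen == 1 then []
      else
        PySem.List.sorted
          (runs.foldl (fun chars (p : Int × Int) =>
            if p.2 == maxLen && !(List.contains chars p.1) then chars ++ [p.1] else chars) [])
          (fun y => y) false

-- ===== PORT B =====
-- 'lens.append(lens[-1] + 1 if x == prev else 1)'; p = (prev, x).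
-- lens[-1] ported as getLast?.getD 0: exact here since the accumulator is always nonempty.
def pvStepL (L : List Int) (p : Int × Int) : List Int :=
  L ++ [if p.2 == p.1 then (L.getLast?.getD 0) + 1 else 1]

def unset_alt (xs : List Int) : List Int :=
  match xs with
  | [] => []
  | _ :: _ =>
    let lens := (xs.zip xs.tail).foldl pvStepL [1]
    match PySem.List.max? lens (fun y => y) with
    | none => []                      -- unreachable: lens is nonempty
    | some m =>
      if m == 1 then []
      else
        PySem.List.sorted
          (PySem.Set.ofList (((xs.zip lens).filter (fun p => p.2 == m)).map (fun p => p.1)))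
          (fun y => y) false

-- ===== PRECONDITION & SPEC =====
def Spec_unset (xs : List Int) (out : List Int) : Prop := out = unset_alt xs
instance (xs : List Int) (out : List Int) : Decidable (Spec_unset xs out) := by unfold Spec_unset; infer_instance

-- ===== CLAIM (what is proved, stated in full; the proofs are below) =====
def Claim_equal_unset : Prop := ∀ (xs : List Int), Dom_unset xs → Spec_unset xs (unset xs)

-- ===== LEMMAS AND PROOFS =====

-- the run-length encoding A's loop builds
def runsAux (cur cnt : Int) : List Int → List (Int × Int)
  | [] => [(cur, cnt)]
  | x :: t => if x == cur then runsAux cur (cnt + 1) t else (cur, cnt) :: runsAux x 1 t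

-- the per-position run lengths B's loop builds (for the tail, given current symbol/count)
def lensAux (cur cnt : Int) : List Int → List Int
  | [] => []
  | x :: t =>
    let v : Int := if x == cur then cnt + 1 else 1
    v :: lensAux x v t

lemma foldA_runs (t : List Int) : ∀ (rs : List (Int × Int)) (cur cnt : Int),
    (t.foldl pvStepA (rs, cur, cnt)).1
      ++ [((t.foldl pvStepA (rs, cur, cnt)).2.1, (t.foldl pvStepA (rs, cur, cnt)).2.2)]
      = rs ++ runsAux cur cnt t := by
  induction t with
  | nil => intro rs cur cnt; simp [runsAux]
  | cons x t ih =>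
    intro rs cur cnt
    by_cases h : x = cur
    · subst h
      simp [pvStepA, runsAux, ih]
    · simp [pvStepA, runsAux, h, ih]

lemma foldB_lens (t : List Int) : ∀ (cur cnt : Int) (L : List Int),
    ((cur :: t).zip t).foldl pvStepL (L ++ [cnt]) = (L ++ [cnt]) ++ lensAux cur cnt t := by
  induction t with
  | nil => intro cur cnt L; simp [lensAux]
  | cons x t ih =>
    intro cur cnt L
    by_cases h : x = cur
    · subst h
      simp only [List.zip_cons_cons, List.foldl_cons, pvStepL, beq_self_eq_true,
        if_pos, List.getLast?_concat, Option.getD_some, lensAux]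
      rw [ih x (cnt + 1) (L ++ [cnt])]
      simp [List.append_assoc]
    · simp only [List.zip_cons_cons, List.foldl_cons, pvStepL, List.getLast?_concat,
        Option.getD_some, lensAux]
      rw [if_neg (by simpa using h)]
      rw [ih x 1 (L ++ [cnt])]
      simp [List.append_assoc]

-- the head run of runsAux carries the current symbol, with count at least cnt
lemma runsAux_head (t : List Int) : ∀ (cur cnt : Int),
    ∃ k rs, runsAux cur cnt t = (cur, k) :: rs ∧ cnt ≤ k := by
  induction t with
  | nil => intro cur cnt; exact ⟨cnt, [], rfl, le_refl _⟩
  | cons x t ih =>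
    intro cur cnt
    by_cases h : x = cur
    · subst h
      obtain ⟨k, rs, heq, hk⟩ := ih x (cnt + 1)
      exact ⟨k, rs, by simp [runsAux, heq], by omega⟩
    · exact ⟨cnt, runsAux x 1 t, by simp [runsAux, h], le_refl _⟩

-- the running max over the DP lengths equals the running max over the run totals
lemma lens_max (t : List Int) : ∀ (cur cnt a : Int), 1 ≤ cnt → cnt ≤ a →
    List.foldl max a (lensAux cur cnt t)
      = List.foldl max a ((runsAux cur cnt t).map (fun p => p.2)) := by
  induction t with
  | nil =>
    intro cur cnt a h1 h2
    simp [lensAux, runsAux]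
    omega
  | cons x t ih =>
    intro cur cnt a h1 h2
    by_cases h : x = cur
    · subst h
      obtain ⟨k, rs, heq, hk⟩ := runsAux_head t x (cnt + 1)
      simp only [lensAux, runsAux, beq_self_eq_true, if_pos, List.foldl_cons]
      rw [ih x (cnt + 1) (max a (cnt + 1)) (by omega) (by omega), heq]
      simp only [List.map_cons, List.foldl_cons]
      congr 1
      omega
    · simp only [lensAux, runsAux]
      rw [if_neg (by simpa using h), if_neg (by simpa using h)]
      simp only [List.foldl_cons, List.map_cons]
      rw [ih x 1 (max a 1) (le_refl _) (by omega)]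
      have h1' : max a 1 = a := by omega
      have h2' : max a cnt = a := by omega
      rw [h1', h2']

-- positions hitting the overall maximum carry exactly the symbols of maximal runs
lemma pairs_to_runs (t : List Int) : ∀ (cur cnt m s : Int),
    (∀ p ∈ runsAux cur cnt t, p.2 ≤ m) →
    (s, m) ∈ (cur, cnt) :: t.zip (lensAux cur cnt t) →
    (s, m) ∈ runsAux cur cnt t := by
  induction t with
  | nil =>
    intro cur cnt m s _ hmem
    simpa [lensAux, runsAux] using hmem
  | cons x t ih =>
    intro cur cnt m s hb hmem
    by_cases h : x = cur
    · subst h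
      simp only [runsAux, beq_self_eq_true, if_pos] at hb ⊢
      simp only [lensAux, beq_self_eq_true, if_pos, List.zip_cons_cons] at hmem
      rcases List.mem_cons.mp hmem with hmem | hmem
      · -- (s, m) = (cur, cnt): impossible, the head run has count ≥ cnt+1 > cnt = m
        obtain ⟨k, rs, heq, hk⟩ := runsAux_head t x (cnt + 1)
        have := hb (x, k) (by rw [heq]; exact List.mem_cons_self ..)
        simp only [Prod.mk.injEq] at hmem
        omega
      · exact ih x (cnt + 1) m s hb hmem
    · simp only [runsAux] at hb ⊢
      rw [if_neg (by simpa using h)] at hb ⊢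
      simp only [lensAux, List.zip_cons_cons] at hmem
      rw [if_neg (by simpa using h)] at hmem
      rcases List.mem_cons.mp hmem with hmem | hmem
      · exact hmem ▸ List.mem_cons_self ..
      · exact List.mem_cons_of_mem _
          (ih x 1 m s (fun p hp => hb p (List.mem_cons_of_mem _ hp)) hmem)

lemma runs_to_pairs (t : List Int) : ∀ (cur cnt m s : Int),
    (s, m) ∈ runsAux cur cnt t →
    (s, m) ∈ (cur, cnt) :: t.zip (lensAux cur cnt t) := by
  induction t with
  | nil =>
    intro cur cnt m s hmem
    simpa [lensAux, runsAux] using hmem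
  | cons x t ih =>
    intro cur cnt m s hmem
    by_cases h : x = cur
    · subst h
      simp only [runsAux, beq_self_eq_true, if_pos] at hmem
      simp only [lensAux, beq_self_eq_true, if_pos, List.zip_cons_cons]
      exact List.mem_cons_of_mem _ (ih x (cnt + 1) m s hmem)
    · simp only [runsAux] at hmem
      rw [if_neg (by simpa using h)] at hmem
      simp only [lensAux, List.zip_cons_cons]
      rw [if_neg (by simpa using h)]
      rcases List.mem_cons.mp hmem with hmem | hmem
      · exact hmem ▸ List.mem_cons_self ..
      · exact List.mem_cons_of_mem _ (ih x 1 m s hmem)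

-- membership in A's dedup-collect loop
lemma chars_mem (M : Int) (r : List (Int × Int)) : ∀ (acc : List Int) (s : Int),
    (s ∈ r.foldl (fun chars (p : Int × Int) =>
        if p.2 == M && !(List.contains chars p.1) then chars ++ [p.1] else chars) acc
      ↔ s ∈ acc ∨ (s, M) ∈ r) := by
  induction r with
  | nil => intro acc s; simp
  | cons q r ih =>
    intro acc s
    rw [List.foldl_cons, ih]
    have hq : (s, M) ∈ q :: r ↔ (q = (s, M)) ∨ (s, M) ∈ r := by
      constructor
      · intro h; rcases List.mem_cons.mp h with h | h
        · left; exact h.symm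
        · right; exact h
      · rintro (h | h)
        · exact h ▸ List.mem_cons_self ..
        · exact List.mem_cons_of_mem _ h
    rw [hq]
    by_cases h2 : q.2 = M
    · by_cases hc : q.1 ∈ acc
      · rw [if_neg (by simp [h2, hc])]
        constructor
        · tauto
        · rintro (h | h | h)
          · tauto
          · left; have : q.1 = s := by rw [h]
            rw [← this]; exact hc
          · tauto
      · rw [if_pos (by simp [h2, hc])]
        have hmem : s ∈ acc ++ [q.1] ↔ s ∈ acc ∨ q.1 = s := by simp [eq_comm]
        rw [hmem]
        constructor
        · rintro (⟨h | h⟩ | h)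
          · tauto
          · right; left; rw [← h, ← h2]
          · tauto
        · rintro (h | h | h)
          · tauto
          · left; right; rw [h]
          · tauto
    · rw [if_neg (by simp [h2])]
      constructor
      · tauto
      · rintro (h | h | h)
        · tauto
        · exfalso; apply h2; rw [h]
        · tauto

lemma chars_nodup (M : Int) (r : List (Int × Int)) : ∀ (acc : List Int), acc.Nodup →
    (r.foldl (fun chars (p : Int × Int) =>
        if p.2 == M && !(List.contains chars p.1) then chars ++ [p.1] else chars) acc).Nodup := by
  induction r with
  | nil => intro acc h; exact h
  | cons q r ih =>
    intro acc h
    rw [List.foldl_cons]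
    apply ih
    split_ifs with hcond
    · simp only [Bool.and_eq_true, beq_iff_eq, Bool.not_eq_true', List.contains_eq_mem,
        decide_eq_false_iff_not] at hcond
      rw [List.nodup_append]
      refine ⟨h, List.nodup_singleton _, ?_⟩
      intro a ha b hb
      rw [List.mem_singleton] at hb
      subst hb
      exact fun he => hcond.2 (he ▸ ha)
    · exact h

-- equal sorted output from equal nodup membership
lemma sorted_eq_of_nodup_mem (l₁ l₂ : List Int) (h₁ : l₁.Nodup) (h₂ : l₂.Nodup)
    (h : ∀ s, s ∈ l₁ ↔ s ∈ l₂) :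
    PySem.List.sorted l₁ (fun y => y) false = PySem.List.sorted l₂ (fun y => y) false := by
  have hperm₂ : (PySem.List.sorted l₂ (fun y => y) false).Perm l₂ := PySem.List.sorted_perm ..
  have hnd : (PySem.List.sorted l₂ (fun y => y) false).Nodup := hperm₂.symm.nodup h₂
  have hperm₁ : (PySem.List.sorted l₂ (fun y => y) false).Perm l₁ := by
    rw [List.perm_ext_iff_of_nodup hnd h₁]
    intro a
    rw [PySem.List.mem_sorted]
    exact (h a).symm
  have hlt : (PySem.List.sorted l₂ (fun y => y) false).Pairwise (fun a b : Int => a < b) := by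
    have hle := PySem.List.sorted_pairwise (xs := l₂) (key := fun y : Int => y)
    exact (hle.and hnd).imp (fun h => lt_of_le_of_ne h.1 h.2)
  exact PySem.List.sorted_eq_of_perm_of_pairwise_lt _ _ _ hperm₁ hlt

-- the two ports' results as functions of the run encoding / of the DP lengths
def pyOutA (runs : List (Int × Int)) : List Int :=
  match PySem.List.max? (runs.map (fun p => p.2)) (fun y => y) with
  | none => []
  | some maxLen =>
    if maxLen == 1 then []
    else
      PySem.List.sorted
        (runs.foldl (fun chars (p : Int × Int) =>
          if p.2 == maxLen && !(List.contains chars p.1) then chars ++ [p.1] else chars) [])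
        (fun y => y) false

def pyOutB (xs lens : List Int) : List Int :=
  match PySem.List.max? lens (fun y => y) with
  | none => []
  | some m =>
    if m == 1 then []
    else
      PySem.List.sorted
        (PySem.Set.ofList (((xs.zip lens).filter (fun p => p.2 == m)).map (fun p => p.1)))
        (fun y => y) false

lemma pyOutA_some (runs : List (Int × Int)) (M : Int)
    (h : PySem.List.max? (runs.map (fun p => p.2)) (fun y => y) = some M) :
    pyOutA runs = if M == 1 then [] else
      PySem.List.sorted
        (runs.foldl (fun chars (p : Int × Int) =>
          if p.2 == M && !(List.contains chars p.1) then chars ++ [p.1] else chars) [])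
        (fun y => y) false := by
  unfold pyOutA; rw [h]

lemma pyOutB_some (xs lens : List Int) (M : Int)
    (h : PySem.List.max? lens (fun y => y) = some M) :
    pyOutB xs lens = if M == 1 then [] else
      PySem.List.sorted
        (PySem.Set.ofList (((xs.zip lens).filter (fun p => p.2 == M)).map (fun p => p.1)))
        (fun y => y) false := by
  unfold pyOutB; rw [h]

lemma unsetA_eq (x0 : Int) (rest : List Int) :
    unset (x0 :: rest) = pyOutA (runsAux x0 1 rest) := by
  have h := foldA_runs rest [] x0 1
  show pyOutA ((rest.foldl pvStepA ([], x0, (1 : Int))).1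
      ++ [((rest.foldl pvStepA ([], x0, (1 : Int))).2.1,
           (rest.foldl pvStepA ([], x0, (1 : Int))).2.2)])
    = pyOutA (runsAux x0 1 rest)
  rw [h]
  rfl

lemma unsetB_eq (x0 : Int) (rest : List Int) :
    unset_alt (x0 :: rest) = pyOutB (x0 :: rest) (1 :: lensAux x0 1 rest) := by
  have h := foldB_lens rest x0 1 []
  show pyOutB (x0 :: rest) (((x0 :: rest).zip rest).foldl pvStepL [1])
    = pyOutB (x0 :: rest) (1 :: lensAux x0 1 rest)
  simp only [List.nil_append] at h
  rw [h]
  rfl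

lemma core (x0 : Int) (rest : List Int) :
    pyOutA (runsAux x0 1 rest) = pyOutB (x0 :: rest) (1 :: lensAux x0 1 rest) := by
  obtain ⟨k, rs, heq, hk⟩ := runsAux_head rest x0 1
  set ms := rs.map (fun p => p.2) with hms
  set M := List.foldl max k ms with hM
  -- A's maximum
  have hmapA : (runsAux x0 1 rest).map (fun p => p.2) = k :: ms := by rw [heq, List.map_cons]
  have hmaxA : PySem.List.max? ((runsAux x0 1 rest).map (fun p => p.2)) (fun y => y) = some M := by
    rw [hmapA, PySem.List.max?_id_cons]
  -- B's maximum
  have hmaxB : PySem.List.max? (1 :: lensAux x0 1 rest) (fun y => y) = some M := by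
    rw [PySem.List.max?_id_cons, lens_max rest x0 1 1 (le_refl _) (le_refl _), hmapA,
      List.foldl_cons]
    have : max (1 : Int) k = k := by omega
    rw [this]
  -- every run total is ≤ M
  have hbound : ∀ p ∈ runsAux x0 1 rest, p.2 ≤ M := by
    intro p hp
    have hmem : p.2 ∈ k :: ms := by rw [← hmapA]; exact List.mem_map_of_mem hp
    rcases List.mem_cons.mp hmem with h | h
    · rw [h, hM]; exact (PySem.List.le_foldl_max ms k).1
    · rw [hM]; exact (PySem.List.le_foldl_max ms k).2 _ h
  rw [pyOutA_some _ _ hmaxA, pyOutB_some _ _ _ hmaxB]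
  by_cases hM1 : M = 1
  · simp [hM1]
  · rw [if_neg (by simpa using hM1), if_neg (by simpa using hM1)]
    apply sorted_eq_of_nodup_mem
    · exact chars_nodup M (runsAux x0 1 rest) [] List.nodup_nil
    · exact PySem.Set.nodup_ofList _
    · intro s
      rw [chars_mem M (runsAux x0 1 rest) [] s, PySem.Set.mem_ofList]
      simp only [List.not_mem_nil, false_or, List.mem_map, List.mem_filter]
      constructor
      · intro hmem
        refine ⟨(s, M), ⟨?_, by simp⟩, rfl⟩
        have := runs_to_pairs rest x0 1 M s hmem
        simpa [List.zip_cons_cons] using this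
      · rintro ⟨⟨p1, p2⟩, ⟨hpin, hpv⟩, hps⟩
        simp only at hps hpv
        have hpv' : p2 = M := by simpa using hpv
        subst hps; subst hpv'
        apply pairs_to_runs rest x0 1 M p1 hbound
        simpa [List.zip_cons_cons] using hpin

-- ===== VERDICT (by name: the statement is the Claim_ definition above) =====
theorem unset_spec : Claim_equal_unset := by
  intro xs _
  unfold Spec_unset
  cases xs with
  | nil => rfl
  | cons x0 rest =>
    rw [unsetA_eq, unsetB_eq]
    exact core x0 rest
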